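-- pv_equiv track=rewrite | github.com/Mehfila-Parkkulthil/normal-form-game-solver | normal_form_game.py | best_responses_p1
-- ===== SOURCE A (Python) =====
-- def best_responses_p1(strategies, payoff_matrix, s2):
--     best_payoff = None
--     best_moves = []
--     for s1 in strategies:
--         p1_payoff = payoff_matrix[(s1, s2)][0]
--         if best_payoff is None or p1_payoff > best_payoff:
--             best_payoff = p1_payoff
--             best_moves = [s1]
--         elif p1_payoff == best_payoff:
--             best_moves.append(s1)
--     return best_moves
-- ===== SOURCE B (Python) =====
-- def best_responses_p1(strategies, payoff_matrix, s2):
--     if not strategies: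
--         return []
--     best = max(payoff_matrix[(s1, s2)][0] for s1 in strategies)
--     return [s1 for s1 in strategies if payoff_matrix[(s1, s2)][0] == best]
-- ===== Notes on version B (the rewrite author's own statement) =====
-- stated objective: simpler
-- what changed: Replaces A's single fused scan carrying mutable (best_payoff, best_moves) state with two separated passes: compute the maximum payoff, then filter the strategies achieving it (order and ties preserved).
import Mathlib
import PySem

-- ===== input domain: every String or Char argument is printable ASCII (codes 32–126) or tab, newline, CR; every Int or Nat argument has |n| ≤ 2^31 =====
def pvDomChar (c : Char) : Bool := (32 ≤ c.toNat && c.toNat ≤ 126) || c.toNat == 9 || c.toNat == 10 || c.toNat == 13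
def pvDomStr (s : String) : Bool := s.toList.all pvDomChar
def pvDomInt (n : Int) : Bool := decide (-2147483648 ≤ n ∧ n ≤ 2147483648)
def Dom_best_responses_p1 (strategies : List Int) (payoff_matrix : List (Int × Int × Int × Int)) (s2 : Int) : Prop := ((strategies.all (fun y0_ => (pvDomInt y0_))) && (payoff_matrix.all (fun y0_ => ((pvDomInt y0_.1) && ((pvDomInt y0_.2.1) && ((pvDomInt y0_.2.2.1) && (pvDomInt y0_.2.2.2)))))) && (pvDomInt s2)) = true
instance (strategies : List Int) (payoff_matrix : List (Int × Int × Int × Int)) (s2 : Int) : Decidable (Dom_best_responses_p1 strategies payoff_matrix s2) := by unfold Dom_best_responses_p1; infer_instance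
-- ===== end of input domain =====

-- B replaces A's fused scan (mutable best_payoff/best_moves) with two separated passes: max, then filter; proved equal wherever A does not raise KeyError.

-- shared dict-lookup primitive: payoff_matrix[(s1, s2)][0] (0 is never observed inside Pre_)
def payP1 (payoff_matrix : List (Int × Int × Int × Int)) (s1 s2 : Int) : Int :=
  match payoff_matrix.find? (fun e => e.1 == s1 && e.2.1 == s2) with
  | some e => e.2.2.1
  | none => 0

-- ===== PORT A =====
def bestGoA (payoff_matrix : List (Int × Int × Int × Int)) (s2 : Int) :
    List Int → Option Int → List Int → List Int
  | [], _, best_moves => best_moves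
  | s1 :: rest, best_payoff, best_moves =>
    let p := payP1 payoff_matrix s1 s2
    match best_payoff with
    | none => bestGoA payoff_matrix s2 rest (some p) [s1]
    | some b =>
      if p > b then bestGoA payoff_matrix s2 rest (some p) [s1]
      else if p == b then bestGoA payoff_matrix s2 rest (some b) (best_moves ++ [s1])
      else bestGoA payoff_matrix s2 rest (some b) best_moves

def best_responses_p1 (strategies : List Int) (payoff_matrix : List (Int × Int × Int × Int)) (s2 : Int) : List Int :=
  bestGoA payoff_matrix s2 strategies none []

-- ===== PORT B =====
def best_responses_p1_alt (strategies : List Int) (payoff_matrix : List (Int × Int × Int × Int)) (s2 : Int) : List Int :=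
  match strategies.map (fun s1 => payP1 payoff_matrix s1 s2) with
  | [] => []
  | p :: ps =>
    let best := ps.foldl max p   -- Python max over a nonempty int sequence
    strategies.filter (fun s1 => payP1 payoff_matrix s1 s2 == best)

-- ===== PRECONDITION & SPEC =====
-- Pre_ excludes exactly the inputs where A raises KeyError: some strategy has no (s1, s2) entry in payoff_matrix.
def Pre_best_responses_p1 (strategies : List Int) (payoff_matrix : List (Int × Int × Int × Int)) (s2 : Int) : Prop :=
  ∀ s1 ∈ strategies, (payoff_matrix.find? (fun e => e.1 == s1 && e.2.1 == s2)).isSome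
instance (strategies : List Int) (payoff_matrix : List (Int × Int × Int × Int)) (s2 : Int) : Decidable (Pre_best_responses_p1 strategies payoff_matrix s2) := by unfold Pre_best_responses_p1; infer_instance

def pvWitness_best_responses_p1 : List Int × (List (Int × Int × Int × Int)) × Int :=
  ([1, 2, 3], [(1, 0, 4, 1), (2, 0, 7, 2), (3, 0, 7, 0)], 0)

def Spec_best_responses_p1 (strategies : List Int) (payoff_matrix : List (Int × Int × Int × Int)) (s2 : Int) (out : List Int) : Prop := out = best_responses_p1_alt strategies payoff_matrix s2
instance (strategies : List Int) (payoff_matrix : List (Int × Int × Int × Int)) (s2 : Int) (out : List Int) : Decidable (Spec_best_responses_p1 strategies payoff_matrix s2 out) := by unfold Spec_best_responses_p1; infer_instance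

-- ===== CLAIM (what is proved, stated in full; the proofs are below) =====
def Claim_equal_best_responses_p1 : Prop := ∀ (strategies : List Int) (payoff_matrix : List (Int × Int × Int × Int)) (s2 : Int), Dom_best_responses_p1 strategies payoff_matrix s2 → Pre_best_responses_p1 strategies payoff_matrix s2 → Spec_best_responses_p1 strategies payoff_matrix s2 (best_responses_p1 strategies payoff_matrix s2)

-- ===== LEMMAS AND PROOFS =====

-- running state of A's loop with best_payoff = some b, characterised in closed form
theorem bestGoA_some (payoff_matrix : List (Int × Int × Int × Int)) (s2 : Int)
    (l : List Int) : ∀ (b : Int) (moves : List Int),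
    bestGoA payoff_matrix s2 l (some b) moves =
      (if l.foldl (fun m s => max m (payP1 payoff_matrix s s2)) b = b then moves else []) ++
      l.filter (fun s => payP1 payoff_matrix s s2 == l.foldl (fun m s => max m (payP1 payoff_matrix s s2)) b) := by
  induction l with
  | nil => intro b moves; simp [bestGoA]
  | cons s rest ih =>
    intro b moves
    simp only [bestGoA, List.foldl_cons, List.filter_cons]
    obtain ⟨p, hp⟩ : ∃ p, payP1 payoff_matrix s s2 = p := ⟨_, rfl⟩
    simp only [hp]
    have hbound := (PySem.List.le_foldl_max_int rest (fun s => payP1 payoff_matrix s s2) (max b p)).1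
    by_cases hgt : p > b
    · have hmax : max b p = p := by omega
      rw [if_pos hgt, ih]
      rw [hmax] at hbound ⊢
      rw [if_neg (by omega : ¬ rest.foldl (fun m s => max m (payP1 payoff_matrix s s2)) p = b)]
      simp only [beq_iff_eq]
      split_ifs <;> first | omega | simp
    · by_cases heq : p = b
      · rw [if_neg hgt, if_pos (by simp [heq]), ih]
        have hmax : max b p = b := by omega
        rw [hmax] at hbound ⊢
        simp only [beq_iff_eq]
        split_ifs <;> first | omega | simp
      · rw [if_neg hgt, if_neg (by simp [heq]), ih]
        have hmax : max b p = b := by omega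
        rw [hmax] at hbound ⊢
        simp only [beq_iff_eq]
        rw [if_neg (by omega : ¬ p = rest.foldl (fun m s => max m (payP1 payoff_matrix s s2)) b)]

theorem best_eq (strategies : List Int) (payoff_matrix : List (Int × Int × Int × Int)) (s2 : Int) :
    best_responses_p1 strategies payoff_matrix s2 = best_responses_p1_alt strategies payoff_matrix s2 := by
  cases strategies with
  | nil => rfl
  | cons s rest =>
    simp only [best_responses_p1, best_responses_p1_alt, bestGoA, List.map_cons]
    rw [bestGoA_some]
    rw [List.foldl_map]
    set p := payP1 payoff_matrix s s2 with hp
    set M := rest.foldl (fun m s => max m (payP1 payoff_matrix s s2)) p with hM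
    simp only [List.filter_cons]
    by_cases hpM : p = M
    · rw [← hp, if_pos hpM.symm]; simp [beq_iff_eq, hpM]
    · rw [← hp, if_neg (fun h => hpM h.symm)]; simp [beq_iff_eq, hpM]

-- ===== VERDICT (by name: the statement is the Claim_ definition above) =====
theorem best_responses_p1_spec : Claim_equal_best_responses_p1 := by
  intro strategies payoff_matrix s2 _ _
  exact best_eq strategies payoff_matrix s2
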